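-- pv_equiv track=rewrite | github.com/CloudVPS/openstack_api_conformance | openstack_api_conformance/swift/test_swift3.py | canonical_string
-- ===== SOURCE A (Python) =====
-- def canonical_string(method, path, headers, expires=None):
--     """
--     Generates the aws canonical string for the given parameters
--     """
--     interesting_headers = {}
--     for key in headers:
--         lk = key.lower()
--         if headers[key] != None and (lk in ['content-md5', 'content-type', 'date'] or
--                                      lk.startswith('x-amz-')):
--             interesting_headers[lk] = str(headers[key]).strip()
--
--     # these keys get empty strings if they don't exist
--     if 'content-type' not in interesting_headers:
--         interesting_headers['content-type'] = ''
--     if 'content-md5' not in interesting_headers: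
--         interesting_headers['content-md5'] = ''
--
--     # if you're using expires for query string auth, then it trumps date
--     # (and provider.date_header)
--     if expires:
--         interesting_headers['date'] = str(expires)
--
--     sorted_header_keys = sorted(interesting_headers.keys())
--
--     buf = "%s\n" % method
--     for key in sorted_header_keys:
--         val = interesting_headers[key]
--         if key.startswith('x-amz-'):
--             buf += "%s:%s\n" % (key, val)
--         else:
--             buf += "%s\n" % val
--
--     # don't include anything after the first ? in the resource...
--     # unless it is one of the QSA of interest, defined above
--     t = path.split('?')
--     buf += t[0]
--
--     return buf
-- ===== SOURCE B (Python) =====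
-- def canonical_string(method, path, headers, expires=None):
--     """
--     AWS canonical string: one classification pass over the headers (no dict of
--     all interesting keys), then fixed-order emission plus an x-amz-only sort.
--     """
--     md5 = ''
--     ctype = ''
--     date = None
--     amz = {}
--     for key, value in headers.items():
--         if value is None:
--             continue
--         lk = key.lower()
--         v = str(value).strip()
--         if lk == 'content-md5':
--             md5 = v
--         elif lk == 'content-type':
--             ctype = v
--         elif lk == 'date':
--             date = v
--         elif lk.startswith('x-amz-'):
--             amz[lk] = v
--     if expires:
--         date = str(expires)
--     buf = method + '\n' + md5 + '\n' + ctype + '\n'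
--     if date is not None:
--         buf += date + '\n'
--     for k in sorted(amz):
--         buf += '%s:%s\n' % (k, amz[k])
--     return buf + path.split('?')[0]
-- ===== Notes on version B (the rewrite author's own statement) =====
-- stated objective: alternative
-- what changed: B replaces A's interesting_headers dict + combined sort of all keys + per-key branching emission by a single classification pass into three scalar slots (content-md5, content-type, date) and an x-amz-only dict, then emits the fixed lines in fixed order and sorts only the x-amz keys.
import Mathlib
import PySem

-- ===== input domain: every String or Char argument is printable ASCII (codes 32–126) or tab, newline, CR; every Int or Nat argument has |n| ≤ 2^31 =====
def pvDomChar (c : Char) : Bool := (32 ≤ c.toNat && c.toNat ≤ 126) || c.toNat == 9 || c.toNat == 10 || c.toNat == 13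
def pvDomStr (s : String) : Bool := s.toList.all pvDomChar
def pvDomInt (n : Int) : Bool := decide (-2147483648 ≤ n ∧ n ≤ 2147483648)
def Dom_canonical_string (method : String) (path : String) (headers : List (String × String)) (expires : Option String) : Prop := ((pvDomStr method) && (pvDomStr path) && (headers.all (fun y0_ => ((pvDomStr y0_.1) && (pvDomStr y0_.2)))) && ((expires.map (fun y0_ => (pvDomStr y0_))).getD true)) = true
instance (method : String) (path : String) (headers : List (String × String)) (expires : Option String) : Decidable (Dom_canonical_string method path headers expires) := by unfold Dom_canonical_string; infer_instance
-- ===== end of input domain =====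

-- B classifies each header once into three fixed slots plus an x-amz--only dict and emits the
-- fixed lines in fixed order, instead of A's all-interesting-keys dict, combined sort and
-- branching emission loop; equal output on every input is proved below.

-- ===== PORT A =====
-- loop body of A's 'for key in headers' (under the String value type headers[key] is never None)
def canonicalStepA (d : PySem.Dict String String) (kv : String × String) : PySem.Dict String String :=
  let lk := PySem.Str.lower kv.1
  if ["content-md5", "content-type", "date"].contains lk || PySem.Str.startswith lk "x-amz-" then
    d.insert lk (PySem.Str.strip kv.2)
  else d

def canonical_string (method : String) (path : String) (headers : List (String × String)) (expires : Option String) : String :=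
  let ih := headers.foldl canonicalStepA PySem.Dict.empty
  let ih := if ih.contains "content-type" then ih else ih.insert "content-type" ""
  let ih := if ih.contains "content-md5" then ih else ih.insert "content-md5" ""
  -- 'if expires:' — None and the empty string are falsy
  let ih := match expires with
            | some e => if e == "" then ih else ih.insert "date" e
            | none => ih
  let sortedKeys := PySem.List.sorted ih.keys (fun k => k) false
  let buf := sortedKeys.foldl (fun buf key =>
      let val := ih.getD key ""
      if PySem.Str.startswith key "x-amz-" then buf ++ key ++ ":" ++ val ++ "\n"
      else buf ++ val ++ "\n") (method ++ "\n")
  -- path.split('?')[0]: '?' ≠ '' so split? is some, and the result is never empty, headD is exact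
  buf ++ ((PySem.Str.split? path "?").getD []).headD ""

-- ===== PORT B =====
-- B's loop state: (md5, content-type, optional date, dict of x-amz- headers)
def canonicalStepB (st : String × String × Option String × PySem.Dict String String)
    (kv : String × String) : String × String × Option String × PySem.Dict String String :=
  let lk := PySem.Str.lower kv.1
  let v := PySem.Str.strip kv.2
  if lk == "content-md5" then (v, st.2.1, st.2.2.1, st.2.2.2)
  else if lk == "content-type" then (st.1, v, st.2.2.1, st.2.2.2)
  else if lk == "date" then (st.1, st.2.1, some v, st.2.2.2)
  else if PySem.Str.startswith lk "x-amz-" then (st.1, st.2.1, st.2.2.1, st.2.2.2.insert lk v)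
  else st

def canonical_string_alt (method : String) (path : String) (headers : List (String × String)) (expires : Option String) : String :=
  let st := headers.foldl canonicalStepB ("", "", none, PySem.Dict.empty)
  -- 'if expires:' — None and the empty string are falsy
  let date := match expires with
              | some e => if e == "" then st.2.2.1 else some e
              | none => st.2.2.1
  let buf := method ++ "\n" ++ st.1 ++ "\n" ++ st.2.1 ++ "\n"
  let buf := match date with
             | some dt => buf ++ dt ++ "\n"
             | none => buf
  let buf := (PySem.List.sorted st.2.2.2.keys (fun k => k) false).foldl
      (fun b k => b ++ k ++ ":" ++ st.2.2.2.getD k "" ++ "\n") buf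
  -- path.split('?')[0], as in A
  buf ++ ((PySem.Str.split? path "?").getD []).headD ""

-- ===== PRECONDITION & SPEC =====
def Spec_canonical_string (method : String) (path : String) (headers : List (String × String)) (expires : Option String) (out : String) : Prop := out = canonical_string_alt method path headers expires
instance (method : String) (path : String) (headers : List (String × String)) (expires : Option String) (out : String) : Decidable (Spec_canonical_string method path headers expires out) := by unfold Spec_canonical_string; infer_instance

-- ===== CLAIM (what is proved, stated in full; the proofs are below) =====
def Claim_equal_canonical_string : Prop := ∀ (method : String) (path : String) (headers : List (String × String)) (expires : Option String), Dom_canonical_string method path headers expires → Spec_canonical_string method path headers expires (canonical_string method path headers expires)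

-- ===== LEMMAS AND PROOFS =====

-- any key starting with "x-amz-" is strictly above the three fixed keys in code-point order
theorem xamz_gt_of_startswith (s : String) (c : Char) (cs : List Char)
    (hs : s.toList = c :: cs) (hc : c < 'x')
    (k : String) (hk : PySem.Str.startswith k "x-amz-" = true) : s < k := by
  rw [PySem.Str.startswith_eq, PySem.Chars.startswith_iff] at hk
  obtain ⟨t, ht⟩ := hk
  have hx : ("x-amz-".toList : List Char) = ['x','-','a','m','z','-'] := by decide
  rw [hx] at ht
  rw [String.lt_iff_toList_lt, hs, ← ht]
  exact List.Lex.rel hc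

theorem xamz_gt_md5 (k : String) (hk : PySem.Str.startswith k "x-amz-" = true) :
    ("content-md5" : String) < k :=
  xamz_gt_of_startswith _ 'c' ['o','n','t','e','n','t','-','m','d','5'] (by decide) (by decide) k hk

theorem xamz_gt_ct (k : String) (hk : PySem.Str.startswith k "x-amz-" = true) :
    ("content-type" : String) < k :=
  xamz_gt_of_startswith _ 'c' ['o','n','t','e','n','t','-','t','y','p','e'] (by decide) (by decide) k hk

theorem xamz_gt_date (k : String) (hk : PySem.Str.startswith k "x-amz-" = true) :
    ("date" : String) < k :=
  xamz_gt_of_startswith _ 'd' ['a','t','e'] (by decide) (by decide) k hk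

theorem xamz_ne_md5 (k : String) (hk : PySem.Str.startswith k "x-amz-" = true) :
    k ≠ "content-md5" := fun h => absurd (xamz_gt_md5 k hk) (by rw [h]; exact lt_irrefl _)

theorem xamz_ne_ct (k : String) (hk : PySem.Str.startswith k "x-amz-" = true) :
    k ≠ "content-type" := fun h => absurd (xamz_gt_ct k hk) (by rw [h]; exact lt_irrefl _)

theorem xamz_ne_date (k : String) (hk : PySem.Str.startswith k "x-amz-" = true) :
    k ≠ "date" := fun h => absurd (xamz_gt_date k hk) (by rw [h]; exact lt_irrefl _)

theorem lt_md5_ct : ("content-md5" : String) < "content-type" := by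
  rw [String.lt_iff_toList_lt]; decide

theorem lt_md5_date : ("content-md5" : String) < "date" := by
  rw [String.lt_iff_toList_lt]; decide

theorem lt_ct_date : ("content-type" : String) < "date" := by
  rw [String.lt_iff_toList_lt]; decide

-- the loop invariant tying A's dict to B's (md5, ctype, date, amz) state
def InvCS (d : PySem.Dict String String)
    (st : String × String × Option String × PySem.Dict String String) : Prop :=
  (d.get? "content-md5").getD "" = st.1 ∧
  (d.get? "content-type").getD "" = st.2.1 ∧
  d.get? "date" = st.2.2.1 ∧
  (∀ k, PySem.Str.startswith k "x-amz-" = true → d.get? k = st.2.2.2.get? k) ∧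
  (∀ k ∈ d.keys, k = "content-md5" ∨ k = "content-type" ∨ k = "date" ∨
      PySem.Str.startswith k "x-amz-" = true) ∧
  (∀ k ∈ st.2.2.2.keys, PySem.Str.startswith k "x-amz-" = true) ∧
  d.keys.Nodup ∧ st.2.2.2.keys.Nodup

theorem InvCS_empty : InvCS PySem.Dict.empty ("", "", none, PySem.Dict.empty) := by
  refine ⟨?_, ?_, ?_, ?_, ?_, ?_, ?_, ?_⟩ <;>
    simp [PySem.Dict.get?_empty, PySem.Dict.keys_empty]

theorem InvCS_step (d : PySem.Dict String String)
    (st : String × String × Option String × PySem.Dict String String)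
    (kv : String × String) (h : InvCS d st) :
    InvCS (canonicalStepA d kv) (canonicalStepB st kv) := by
  obtain ⟨h1, h2, h3, h4, h5, h6, h7, h8⟩ := h
  unfold canonicalStepA canonicalStepB
  dsimp only
  generalize PySem.Str.lower kv.1 = lk
  generalize PySem.Str.strip kv.2 = v
  by_cases e1 : lk = "content-md5"
  · subst e1
    rw [if_pos (by decide), if_pos (by decide)]
    refine ⟨?_, ?_, ?_, ?_, ?_, h6, PySem.Dict.nodup_keys_insert _ _ _ h7, h8⟩
    · rw [PySem.Dict.get?_insert_self]; rfl
    · rw [PySem.Dict.get?_insert_of_ne _ _ (by decide)]; exact h2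
    · rw [PySem.Dict.get?_insert_of_ne _ _ (by decide)]; exact h3
    · intro k hk
      rw [PySem.Dict.get?_insert_of_ne _ _ (xamz_ne_md5 k hk)]; exact h4 k hk
    · intro k hk
      rcases (PySem.Dict.mem_keys_insert _ _ _ _).mp hk with rfl | hk
      · exact Or.inl rfl
      · exact h5 k hk
  · by_cases e2 : lk = "content-type"
    · subst e2
      rw [if_pos (by decide), if_neg (by decide), if_pos (by decide)]
      refine ⟨?_, ?_, ?_, ?_, ?_, h6, PySem.Dict.nodup_keys_insert _ _ _ h7, h8⟩
      · rw [PySem.Dict.get?_insert_of_ne _ _ (by decide)]; exact h1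
      · rw [PySem.Dict.get?_insert_self]; rfl
      · rw [PySem.Dict.get?_insert_of_ne _ _ (by decide)]; exact h3
      · intro k hk
        rw [PySem.Dict.get?_insert_of_ne _ _ (xamz_ne_ct k hk)]; exact h4 k hk
      · intro k hk
        rcases (PySem.Dict.mem_keys_insert _ _ _ _).mp hk with rfl | hk
        · exact Or.inr (Or.inl rfl)
        · exact h5 k hk
    · by_cases e3 : lk = "date"
      · subst e3
        rw [if_pos (by decide), if_neg (by decide), if_neg (by decide), if_pos (by decide)]
        refine ⟨?_, ?_, ?_, ?_, ?_, h6, PySem.Dict.nodup_keys_insert _ _ _ h7, h8⟩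
        · rw [PySem.Dict.get?_insert_of_ne _ _ (by decide)]; exact h1
        · rw [PySem.Dict.get?_insert_of_ne _ _ (by decide)]; exact h2
        · rw [PySem.Dict.get?_insert_self]
        · intro k hk
          rw [PySem.Dict.get?_insert_of_ne _ _ (xamz_ne_date k hk)]; exact h4 k hk
        · intro k hk
          rcases (PySem.Dict.mem_keys_insert _ _ _ _).mp hk with rfl | hk
          · exact Or.inr (Or.inr (Or.inl rfl))
          · exact h5 k hk
      · by_cases e4 : PySem.Str.startswith lk "x-amz-" = true
        · rw [if_pos (by rw [e4, Bool.or_true]),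
            if_neg (by simpa using e1), if_neg (by simpa using e2), if_neg (by simpa using e3),
            if_pos e4]
          refine ⟨?_, ?_, ?_, ?_, ?_, ?_, PySem.Dict.nodup_keys_insert _ _ _ h7,
            PySem.Dict.nodup_keys_insert _ _ _ h8⟩
          · rw [PySem.Dict.get?_insert_of_ne _ _ (Ne.symm (xamz_ne_md5 lk e4))]; exact h1
          · rw [PySem.Dict.get?_insert_of_ne _ _ (Ne.symm (xamz_ne_ct lk e4))]; exact h2
          · rw [PySem.Dict.get?_insert_of_ne _ _ (Ne.symm (xamz_ne_date lk e4))]; exact h3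
          · intro k hk
            by_cases hkl : k = lk
            · subst hkl
              rw [PySem.Dict.get?_insert_self, PySem.Dict.get?_insert_self]
            · rw [PySem.Dict.get?_insert_of_ne _ _ hkl, PySem.Dict.get?_insert_of_ne _ _ hkl]
              exact h4 k hk
          · intro k hk
            rcases (PySem.Dict.mem_keys_insert _ _ _ _).mp hk with rfl | hk
            · exact Or.inr (Or.inr (Or.inr e4))
            · exact h5 k hk
          · intro k hk
            rcases (PySem.Dict.mem_keys_insert _ _ _ _).mp hk with rfl | hk
            · exact e4
            · exact h6 k hk
        · have e4' : PySem.Str.startswith lk "x-amz-" = false := by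
            rw [← Bool.not_eq_true]; exact e4
          have hco : (["content-md5", "content-type", "date"].contains lk
              || PySem.Str.startswith lk "x-amz-") = false := by
            simp only [List.contains_cons, List.contains_nil, Bool.or_false, e4',
              Bool.or_eq_false_iff, beq_eq_false_iff_ne]
            exact ⟨fun h => e1 h, fun h => e2 h, fun h => e3 h⟩
          rw [if_neg (by rw [hco]; exact Bool.false_ne_true),
            if_neg (by simpa using e1), if_neg (by simpa using e2), if_neg (by simpa using e3),
            if_neg e4]
          exact ⟨h1, h2, h3, h4, h5, h6, h7, h8⟩

theorem InvCS_foldl (hs : List (String × String)) (d : PySem.Dict String String)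
    (st : String × String × Option String × PySem.Dict String String) (h : InvCS d st) :
    InvCS (hs.foldl canonicalStepA d) (hs.foldl canonicalStepB st) := by
  induction hs generalizing d st with
  | nil => exact h
  | cons kv tl ih => exact ih _ _ (InvCS_step d st kv h)

-- facts about A's "insert a default unless the key is present" step
theorem default_get?_self (d : PySem.Dict String String) (key val : String) :
    (if d.contains key then d else d.insert key val).get? key
      = some ((d.get? key).getD val) := by
  by_cases h : d.contains key
  · rw [if_pos h]
    rcases hg : d.get? key with _ | w
    · rw [PySem.Dict.get?_eq_none_iff_contains] at hg; rw [h] at hg; cases hg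
    · rfl
  · rw [if_neg h, PySem.Dict.get?_insert_self]
    have hg : d.get? key = none := by
      rw [PySem.Dict.get?_eq_none_iff_contains]
      exact Bool.not_eq_true _ ▸ (by simpa using h)
    rw [hg]; rfl

theorem default_get?_ne (d : PySem.Dict String String) (key val k : String) (hne : k ≠ key) :
    (if d.contains key then d else d.insert key val).get? k = d.get? k := by
  by_cases h : d.contains key
  · rw [if_pos h]
  · rw [if_neg h, PySem.Dict.get?_insert_of_ne _ _ hne]

theorem default_mem_keys (d : PySem.Dict String String) (key val k : String) :
    k ∈ (if d.contains key then d else d.insert key val).keys ↔ k = key ∨ k ∈ d.keys := by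
  by_cases h : d.contains key
  · rw [if_pos h]
    constructor
    · exact Or.inr
    · rintro (rfl | hk)
      · exact (PySem.Dict.contains_iff_mem_keys _ _).mp h
      · exact hk
  · rw [if_neg h]
    exact PySem.Dict.mem_keys_insert _ _ _ _

theorem default_nodup (d : PySem.Dict String String) (key val : String)
    (h : d.keys.Nodup) : (if d.contains key then d else d.insert key val).keys.Nodup := by
  by_cases hc : d.contains key
  · rw [if_pos hc]; exact h
  · rw [if_neg hc]; exact PySem.Dict.nodup_keys_insert _ _ _ h

-- the membership criterion: a key is in a dict's keys iff get? is some
theorem mem_keys_iff_get?_isSome (d : PySem.Dict String String) (k : String) :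
    k ∈ d.keys ↔ (d.get? k).isSome := by
  rcases hg : d.get? k with _ | w
  · rw [PySem.Dict.get?_eq_none_iff_not_mem_keys] at hg
    simp [hg]
  · have : k ∈ d.keys := by
      by_contra hmem
      rw [← PySem.Dict.get?_eq_none_iff_not_mem_keys] at hmem
      rw [hmem] at hg; cases hg
    simp [this]

theorem canonical_string_spec' (method path : String) (headers : List (String × String))
    (expires : Option String) :
    canonical_string method path headers expires
      = canonical_string_alt method path headers expires := by
  unfold canonical_string canonical_string_alt
  dsimp only
  obtain ⟨h1, h2, h3, h4, h5, h6, h7, h8⟩ :=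
    InvCS_foldl headers PySem.Dict.empty ("", "", none, PySem.Dict.empty) InvCS_empty
  set d0 := headers.foldl canonicalStepA PySem.Dict.empty with hd0
  set st := headers.foldl canonicalStepB ("", "", none, PySem.Dict.empty) with hst
  set d1 := if d0.contains "content-type" then d0 else d0.insert "content-type" "" with hd1
  set d2 := if d1.contains "content-md5" then d1 else d1.insert "content-md5" "" with hd2
  -- facts after the two defaults
  have f1 : d2.get? "content-md5" = some st.1 := by
    rw [hd2, default_get?_self, default_get?_ne d0 _ _ _ (by decide), h1]
  have f2 : d2.get? "content-type" = some st.2.1 := by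
    rw [hd2, default_get?_ne _ _ _ _ (by decide), hd1, default_get?_self, h2]
  have f3 : d2.get? "date" = st.2.2.1 := by
    rw [hd2, default_get?_ne _ _ _ _ (by decide), hd1, default_get?_ne _ _ _ _ (by decide), h3]
  have f4 : ∀ k, PySem.Str.startswith k "x-amz-" = true → d2.get? k = st.2.2.2.get? k := by
    intro k hk
    rw [hd2, default_get?_ne _ _ _ _ (xamz_ne_md5 k hk), hd1,
      default_get?_ne _ _ _ _ (xamz_ne_ct k hk)]
    exact h4 k hk
  have f5 : ∀ k ∈ d2.keys, k = "content-md5" ∨ k = "content-type" ∨ k = "date" ∨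
      PySem.Str.startswith k "x-amz-" = true := by
    intro k hk
    rw [hd2, default_mem_keys] at hk
    rcases hk with rfl | hk
    · exact Or.inl rfl
    rw [hd1, default_mem_keys] at hk
    rcases hk with rfl | hk
    · exact Or.inr (Or.inl rfl)
    · exact h5 k hk
  have f7 : d2.keys.Nodup := by
    rw [hd2]; exact default_nodup _ _ _ (by rw [hd1]; exact default_nodup _ _ _ h7)
  -- the expires override
  set d3 := (match expires with
             | some e => if e == "" then d2 else d2.insert "date" e
             | none => d2) with hd3
  set dateF := (match expires with
                | some e => if e == "" then st.2.2.1 else some e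
                | none => st.2.2.1) with hdateF
  have g1 : d3.get? "content-md5" = some st.1 := by
    rw [hd3]
    rcases expires with _ | e
    · exact f1
    · dsimp only
      by_cases he : e == ""
      · rw [if_pos he]; exact f1
      · rw [if_neg he, PySem.Dict.get?_insert_of_ne _ _ (by decide)]; exact f1
  have g2 : d3.get? "content-type" = some st.2.1 := by
    rw [hd3]
    rcases expires with _ | e
    · exact f2
    · dsimp only
      by_cases he : e == ""
      · rw [if_pos he]; exact f2
      · rw [if_neg he, PySem.Dict.get?_insert_of_ne _ _ (by decide)]; exact f2
  have g3 : d3.get? "date" = dateF := by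
    rw [hd3, hdateF]
    rcases expires with _ | e
    · exact f3
    · dsimp only
      by_cases he : e == ""
      · rw [if_pos he, if_pos he]; exact f3
      · rw [if_neg he, if_neg he, PySem.Dict.get?_insert_self]
  have g4 : ∀ k, PySem.Str.startswith k "x-amz-" = true → d3.get? k = st.2.2.2.get? k := by
    intro k hk
    rw [hd3]
    rcases expires with _ | e
    · exact f4 k hk
    · dsimp only
      by_cases he : e == ""
      · rw [if_pos he]; exact f4 k hk
      · rw [if_neg he, PySem.Dict.get?_insert_of_ne _ _ (xamz_ne_date k hk)]; exact f4 k hk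
  have g5 : ∀ k ∈ d3.keys, k = "content-md5" ∨ k = "content-type" ∨ k = "date" ∨
      PySem.Str.startswith k "x-amz-" = true := by
    intro k hk
    rw [hd3] at hk
    rcases expires with _ | e
    · exact f5 k hk
    · dsimp only at hk
      by_cases he : e == ""
      · rw [if_pos he] at hk; exact f5 k hk
      · rw [if_neg he] at hk
        rcases (PySem.Dict.mem_keys_insert _ _ _ _).mp hk with rfl | hk
        · exact Or.inr (Or.inr (Or.inl rfl))
        · exact f5 k hk
  have g7 : d3.keys.Nodup := by
    rw [hd3]
    rcases expires with _ | e
    · exact f7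
    · dsimp only
      by_cases he : e == ""
      · rw [if_pos he]; exact f7
      · rw [if_neg he]; exact PySem.Dict.nodup_keys_insert _ _ _ f7
  -- the amz tail of the sorted key list
  set amzS := PySem.List.sorted st.2.2.2.keys (fun k => k) false with hamzS
  have hamz_mem : ∀ k, k ∈ amzS ↔ k ∈ st.2.2.2.keys := by
    intro k; rw [hamzS]; exact PySem.List.mem_sorted _ _ _ _
  have hamz_sw : ∀ k ∈ amzS, PySem.Str.startswith k "x-amz-" = true := by
    intro k hk; exact h6 k ((hamz_mem k).mp hk)
  have hamz_nodup : amzS.Nodup := by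
    rw [hamzS]; exact ((PySem.List.sorted_perm st.2.2.2.keys (fun k => k) false).nodup_iff).mpr h8
  have hamz_pw : amzS.Pairwise (fun a b : String => a < b) := by
    have hle : amzS.Pairwise (fun a b : String => a ≤ b) := by
      rw [hamzS]; exact PySem.List.sorted_pairwise _ _
    exact (hle.and hamz_nodup).imp (fun h => lt_of_le_of_ne h.1 h.2)
  -- make the accumulated values opaque and split on whether a date line is emitted
  clear hd3 hdateF hd2 hd1 hamzS f1 f2 f3 f4 f5 f7 h1 h2 h3 h4 h5 h6 h7
  clear_value d3 dateF amzS
  have hsw_md5 : PySem.Str.startswith "content-md5" "x-amz-" = false := by decide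
  have hsw_ct : PySem.Str.startswith "content-type" "x-amz-" = false := by decide
  have hsw_date : PySem.Str.startswith "date" "x-amz-" = false := by decide
  have hfold : ∀ b : String,
      amzS.foldl (fun buf key =>
        let val := d3.getD key ""
        if PySem.Str.startswith key "x-amz-" then buf ++ key ++ ":" ++ val ++ "\n"
        else buf ++ val ++ "\n") b
      = amzS.foldl (fun b k => b ++ k ++ ":" ++ st.2.2.2.getD k "" ++ "\n") b := by
    intro b
    apply PySem.List.foldl_congr_mem
    intro acc k hk
    have hsw := hamz_sw k hk
    dsimp only
    rw [if_pos hsw, PySem.Dict.getD_eq_get?_getD, PySem.Dict.getD_eq_get?_getD, g4 k hsw]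
  cases dateF with
  | none =>
    have hkeys : PySem.List.sorted d3.keys (fun k => k) false
        = "content-md5" :: "content-type" :: amzS := by
      apply PySem.List.sorted_eq_of_perm_of_pairwise_lt
      · rw [List.perm_ext_iff_of_nodup ?_ g7]
        · intro k
          simp only [List.mem_cons]
          constructor
          · rintro (rfl | rfl | hk)
            · rw [mem_keys_iff_get?_isSome, g1]; rfl
            · rw [mem_keys_iff_get?_isSome, g2]; rfl
            · have hsw := hamz_sw k hk
              rw [mem_keys_iff_get?_isSome, g4 k hsw, ← mem_keys_iff_get?_isSome]
              exact (hamz_mem k).mp hk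
          · intro hk
            rcases g5 k hk with rfl | rfl | rfl | hsw
            · exact Or.inl rfl
            · exact Or.inr (Or.inl rfl)
            · rw [mem_keys_iff_get?_isSome, g3] at hk; cases hk
            · refine Or.inr (Or.inr ?_)
              rw [hamz_mem, mem_keys_iff_get?_isSome, ← g4 k hsw, ← mem_keys_iff_get?_isSome]
              exact hk
        · refine List.nodup_cons.mpr ⟨?_, List.nodup_cons.mpr ⟨?_, hamz_nodup⟩⟩
          · intro hmem
            rcases List.mem_cons.mp hmem with h' | h'
            · exact absurd h' (by decide)
            · exact absurd rfl (xamz_ne_md5 _ (hamz_sw _ h'))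
          · intro hmem
            exact absurd rfl (xamz_ne_ct _ (hamz_sw _ hmem))
      · refine List.pairwise_cons.mpr ⟨?_, List.pairwise_cons.mpr ⟨?_, hamz_pw⟩⟩
        · intro k hk
          rcases List.mem_cons.mp hk with rfl | hk
          · exact lt_md5_ct
          · exact xamz_gt_md5 k (hamz_sw k hk)
        · intro k hk
          exact xamz_gt_ct k (hamz_sw k hk)
    rw [hkeys]
    simp only [List.foldl_cons]
    simp only [hsw_md5, hsw_ct, Bool.false_eq_true, if_false]
    rw [PySem.Dict.getD_of_get?_eq_some _ _ g1, PySem.Dict.getD_of_get?_eq_some _ _ g2, hfold]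
  | some dt =>
    have hkeys : PySem.List.sorted d3.keys (fun k => k) false
        = "content-md5" :: "content-type" :: "date" :: amzS := by
      apply PySem.List.sorted_eq_of_perm_of_pairwise_lt
      · rw [List.perm_ext_iff_of_nodup ?_ g7]
        · intro k
          simp only [List.mem_cons]
          constructor
          · rintro (rfl | rfl | rfl | hk)
            · rw [mem_keys_iff_get?_isSome, g1]; rfl
            · rw [mem_keys_iff_get?_isSome, g2]; rfl
            · rw [mem_keys_iff_get?_isSome, g3]; rfl
            · have hsw := hamz_sw k hk
              rw [mem_keys_iff_get?_isSome, g4 k hsw, ← mem_keys_iff_get?_isSome]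
              exact (hamz_mem k).mp hk
          · intro hk
            rcases g5 k hk with rfl | rfl | rfl | hsw
            · exact Or.inl rfl
            · exact Or.inr (Or.inl rfl)
            · exact Or.inr (Or.inr (Or.inl rfl))
            · refine Or.inr (Or.inr (Or.inr ?_))
              rw [hamz_mem, mem_keys_iff_get?_isSome, ← g4 k hsw, ← mem_keys_iff_get?_isSome]
              exact hk
        · refine List.nodup_cons.mpr ⟨?_, List.nodup_cons.mpr ⟨?_,
            List.nodup_cons.mpr ⟨?_, hamz_nodup⟩⟩⟩
          · intro hmem
            rcases List.mem_cons.mp hmem with h' | h'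
            · exact absurd h' (by decide)
            rcases List.mem_cons.mp h' with h'' | h''
            · exact absurd h'' (by decide)
            · exact absurd rfl (xamz_ne_md5 _ (hamz_sw _ h''))
          · intro hmem
            rcases List.mem_cons.mp hmem with h' | h'
            · exact absurd h' (by decide)
            · exact absurd rfl (xamz_ne_ct _ (hamz_sw _ h'))
          · intro hmem
            exact absurd rfl (xamz_ne_date _ (hamz_sw _ hmem))
      · refine List.pairwise_cons.mpr ⟨?_, List.pairwise_cons.mpr ⟨?_,
          List.pairwise_cons.mpr ⟨?_, hamz_pw⟩⟩⟩
        · intro k hk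
          rcases List.mem_cons.mp hk with rfl | hk
          · exact lt_md5_ct
          rcases List.mem_cons.mp hk with rfl | hk
          · exact lt_md5_date
          · exact xamz_gt_md5 k (hamz_sw k hk)
        · intro k hk
          rcases List.mem_cons.mp hk with rfl | hk
          · exact lt_ct_date
          · exact xamz_gt_ct k (hamz_sw k hk)
        · intro k hk
          exact xamz_gt_date k (hamz_sw k hk)
    rw [hkeys]
    simp only [List.foldl_cons]
    simp only [hsw_md5, hsw_ct, hsw_date, Bool.false_eq_true, if_false]
    rw [PySem.Dict.getD_of_get?_eq_some _ _ g1, PySem.Dict.getD_of_get?_eq_some _ _ g2,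
      PySem.Dict.getD_of_get?_eq_some _ _ g3, hfold]

-- ===== VERDICT (by name: the statement is the Claim_ definition above) =====
theorem canonical_string_spec : Claim_equal_canonical_string := by
  intro method path headers expires _
  exact canonical_string_spec' method path headers expires
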